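-- pv_equiv track=rewrite | github.com/Nikedi/DefHack | DefHack/intel_indexer.py | txt_blocks_with_lines
-- ===== SOURCE A (Python) =====
-- def txt_blocks_with_lines(raw: str, max_chars=1200):
--     lines = raw.splitlines()
--     out, buf, start = [], "", None
--     for i, line in enumerate(lines, start=1):
--         s = line.strip()
--         if not s and buf:
--             out.append((buf, start, i-1)); buf=""; start=None; continue
--         if not s:
--             continue
--         if start is None: start = i
--         if len(buf)+len(s)+1 > max_chars:
--             out.append((buf, start, i-1)); buf=s; start=i
--         else:
--             buf = (buf + " " + s).strip() if buf else s
--     if buf: out.append((buf, start, len(lines)))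
--     return out
-- ===== SOURCE B (Python) =====
-- def txt_blocks_with_lines(raw: str, max_chars=1200):
--     stripped = [l.strip() for l in raw.splitlines()]
--     # phase 1: collect paragraphs = maximal runs of non-blank lines, as (1-based start line, lines)
--     paras = []
--     cur = None
--     for i, s in enumerate(stripped, start=1):
--         if s:
--             if cur is None:
--                 cur = (i, [s])
--             else:
--                 cur[1].append(s)
--         elif cur is not None:
--             paras.append(cur)
--             cur = None
--     if cur is not None:
--         paras.append(cur)
--     # phase 2: greedily pack each paragraph's lines into blocks
--     out = []
--     for start, ss in paras:
--         buf, bstart = "", start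
--         for k, s in enumerate(ss):
--             line_no = start + k
--             if len(buf) + len(s) + 1 > max_chars:
--                 out.append((buf, bstart, line_no - 1))
--                 buf, bstart = s, line_no
--             else:
--                 buf = buf + " " + s if buf else s
--         out.append((buf, bstart, start + len(ss) - 1))
--     return out
-- ===== Notes on version B (the rewrite author's own statement) =====
-- stated objective: alternative
-- what changed: B replaces A's single-pass state machine (buffer/start/None flags threaded through one loop with a trailing flush) by a two-phase decomposition: first collect the paragraphs (maximal runs of non-blank stripped lines with their 1-based start line), then greedily pack each paragraph's lines into size-bounded blocks.
import Mathlib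
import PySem

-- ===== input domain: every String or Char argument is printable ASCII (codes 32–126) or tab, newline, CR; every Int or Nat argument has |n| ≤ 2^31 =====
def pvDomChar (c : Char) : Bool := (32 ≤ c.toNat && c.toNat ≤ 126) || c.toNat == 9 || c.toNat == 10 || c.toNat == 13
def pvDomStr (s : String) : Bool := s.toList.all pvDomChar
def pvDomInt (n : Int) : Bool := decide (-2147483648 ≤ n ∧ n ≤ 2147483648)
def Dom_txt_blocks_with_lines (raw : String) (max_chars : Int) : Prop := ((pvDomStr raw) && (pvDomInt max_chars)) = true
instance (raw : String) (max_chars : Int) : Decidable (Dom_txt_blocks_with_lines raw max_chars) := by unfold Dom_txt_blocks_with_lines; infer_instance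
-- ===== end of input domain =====

-- B re-implements A by a different decomposition: one pass that splits the text into
-- paragraphs (maximal runs of non-blank lines) first, then greedily packs each
-- paragraph separately, instead of A's single state machine; objective: alternative.

-- ===== PORT A =====
-- Loop body of A's single for-loop; state = (out, buf, start).
-- Python's `start` is None exactly while buf == ""; whenever it is read, buf ≠ "" or it
-- was just assigned, so it is `some`; `.getD 0` is never the default-case on those reads.
def aStep (max_chars : Int) (acc : List (String × Int × Int) × String × Option Int)
    (il : Int × String) : List (String × Int × Int) × String × Option Int :=
  let (out, buf, start) := acc
  let s := PySem.Str.strip il.2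
  if s = "" then
    if buf ≠ "" then (out ++ [(buf, start.getD 0, il.1 - 1)], "", none)
    else acc
  else
    let start := if start = none then some il.1 else start
    if PySem.Str.len buf + PySem.Str.len s + 1 > max_chars then
      (out ++ [(buf, start.getD 0, il.1 - 1)], s, some il.1)
    else
      (out, if buf ≠ "" then PySem.Str.strip (buf ++ " " ++ s) else s, start)

def txt_blocks_with_lines (raw : String) (max_chars : Int) : List (String × Int × Int) :=
  let lines := PySem.Str.splitlines raw
  let r := (PySem.List.enumerate lines 1).foldl (aStep max_chars) ([], "", none)
  if r.2.1 ≠ "" then r.1 ++ [(r.2.1, r.2.2.getD 0, PySem.List.len lines)] else r.1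

-- ===== PORT B =====
-- phase 1 loop body: accumulate the current paragraph (cur) and the finished paragraphs
def bParaStep (acc : List (Int × List String) × Option (Int × List String)) (il : Int × String) :
    List (Int × List String) × Option (Int × List String) :=
  if il.2 ≠ "" then
    match acc.2 with
    | none => (acc.1, some (il.1, [il.2]))
    | some c => (acc.1, some (c.1, c.2 ++ [il.2]))
  else
    match acc.2 with
    | none => acc
    | some c => (acc.1 ++ [c], none)

-- phase 2 inner for-loop body over enumerate(ss); state = (out, buf, bstart)
def bPackStep (max_chars start : Int) (acc : List (String × Int × Int) × String × Int)
    (kv : Int × String) : List (String × Int × Int) × String × Int :=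
  let (out, buf, bstart) := acc
  let line_no := start + kv.1
  if PySem.Str.len buf + PySem.Str.len kv.2 + 1 > max_chars then
    (out ++ [(buf, bstart, line_no - 1)], kv.2, line_no)
  else
    (out, if buf ≠ "" then buf ++ " " ++ kv.2 else kv.2, bstart)

-- phase 2 body for one paragraph
def bPackInto (max_chars : Int) (out : List (String × Int × Int)) (p : Int × List String) :
    List (String × Int × Int) :=
  let r := (PySem.List.enumerate p.2 0).foldl (bPackStep max_chars p.1) (out, "", p.1)
  r.1 ++ [(r.2.1, r.2.2, p.1 + PySem.List.len p.2 - 1)]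

def txt_blocks_with_lines_alt (raw : String) (max_chars : Int) : List (String × Int × Int) :=
  let stripped := (PySem.Str.splitlines raw).map PySem.Str.strip
  let r := (PySem.List.enumerate stripped 1).foldl bParaStep ([], none)
  let paras := match r.2 with | none => r.1 | some c => r.1 ++ [c]
  paras.foldl (bPackInto max_chars) []

-- ===== PRECONDITION & SPEC =====
def Spec_txt_blocks_with_lines (raw : String) (max_chars : Int) (out : List (String × Int × Int)) : Prop := out = txt_blocks_with_lines_alt raw max_chars
instance (raw : String) (max_chars : Int) (out : List (String × Int × Int)) : Decidable (Spec_txt_blocks_with_lines raw max_chars out) := by unfold Spec_txt_blocks_with_lines; infer_instance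

-- ===== CLAIM (what is proved, stated in full; the proofs are below) =====
def Claim_equal_txt_blocks_with_lines : Prop := ∀ (raw : String) (max_chars : Int), Dom_txt_blocks_with_lines raw max_chars → Spec_txt_blocks_with_lines raw max_chars (txt_blocks_with_lines raw max_chars)

-- ===== LEMMAS AND PROOFS =====

-- ---- character-level facts about strip ----

lemma head?_dropWhile_false {α : Type} (p : α → Bool) (l : List α) (x : α)
    (h : (l.dropWhile p).head? = some x) : p x = false := by
  induction l with
  | nil => simp at h
  | cons a t ih =>
    rw [List.dropWhile_cons] at h
    by_cases hp : p a = true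
    · simp [hp] at h; exact ih h
    · simp [hp] at h; subst h; simpa using hp

lemma lstrip_eq_of_head (l : List Char)
    (h : ∀ x, l.head? = some x → PySem.Chars.isspace x = false) :
    PySem.Chars.lstrip l = l := by
  cases l with
  | nil => rfl
  | cons a t =>
    have := h a rfl
    simp [PySem.Chars.lstrip, List.dropWhile_cons, this]

lemma rstrip_eq_of_getLast (l : List Char)
    (h : ∀ x, l.getLast? = some x → PySem.Chars.isspace x = false) :
    PySem.Chars.rstrip l = l := by
  have hrev : ∀ x, l.reverse.head? = some x → PySem.Chars.isspace x = false := by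
    intro x hx; exact h x (by rwa [List.head?_reverse] at hx)
  have : PySem.Chars.lstrip l.reverse = l.reverse := lstrip_eq_of_head l.reverse hrev
  show (List.dropWhile PySem.Chars.isspace l.reverse).reverse = l
  have h2 : List.dropWhile PySem.Chars.isspace l.reverse = l.reverse := this
  rw [h2, List.reverse_reverse]

lemma prefix_head? {α : Type} {t m : List α} {x : α} (hp : t <+: m) (h : t.head? = some x) :
    m.head? = some x := by
  obtain ⟨r, rfl⟩ := hp
  cases t with
  | nil => simp at h
  | cons a u => simp at h ⊢; exact h

lemma rstrip_prefix (m : List Char) : PySem.Chars.rstrip m <+: m := by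
  show (List.dropWhile PySem.Chars.isspace m.reverse).reverse <+: m
  have := List.dropWhile_suffix (l := m.reverse) PySem.Chars.isspace
  have h2 := List.reverse_prefix.mpr this
  rwa [List.reverse_reverse] at h2

lemma head?_strip_false (l : List Char) (x : Char)
    (h : (PySem.Chars.strip l).head? = some x) : PySem.Chars.isspace x = false := by
  have hm : (PySem.Chars.lstrip l).head? = some x :=
    prefix_head? (rstrip_prefix (PySem.Chars.lstrip l)) h
  exact head?_dropWhile_false _ _ _ hm

lemma getLast?_strip_false (l : List Char) (x : Char)
    (h : (PySem.Chars.strip l).getLast? = some x) : PySem.Chars.isspace x = false := by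
  have : (PySem.Chars.strip l).reverse.head? = some x := by rwa [List.head?_reverse]
  have h2 : (List.dropWhile PySem.Chars.isspace (PySem.Chars.lstrip l).reverse).head? = some x := by
    have hr : (PySem.Chars.strip l).reverse
        = List.dropWhile PySem.Chars.isspace (PySem.Chars.lstrip l).reverse := by
      show (List.dropWhile PySem.Chars.isspace (PySem.Chars.lstrip l).reverse).reverse.reverse = _
      rw [List.reverse_reverse]
    rwa [hr] at this
  exact head?_dropWhile_false _ _ _ h2

lemma strip_eq_of_ends (l : List Char)
    (h1 : ∀ x, l.head? = some x → PySem.Chars.isspace x = false)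
    (h2 : ∀ x, l.getLast? = some x → PySem.Chars.isspace x = false) :
    PySem.Chars.strip l = l := by
  show PySem.Chars.rstrip (PySem.Chars.lstrip l) = l
  rw [lstrip_eq_of_head l h1]
  exact rstrip_eq_of_getLast l h2

lemma strip_idem (l : List Char) : PySem.Chars.strip (PySem.Chars.strip l) = PySem.Chars.strip l := by
  exact strip_eq_of_ends _ (head?_strip_false l) (getLast?_strip_false l)

lemma strip_join (a b : List Char) (ha : PySem.Chars.strip a = a) (hb : PySem.Chars.strip b = b)
    (ha' : a ≠ []) (hb' : b ≠ []) :
    PySem.Chars.strip (a ++ ' ' :: b) = a ++ ' ' :: b := by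
  apply strip_eq_of_ends
  · intro x hx
    rw [List.head?_append] at hx
    have hax : a.head? = some x := by
      cases ha0 : a.head? with
      | none => exact absurd (List.head?_eq_none_iff.mp ha0) ha'
      | some y => rw [ha0] at hx; simp at hx; simp [ha0, hx]
    exact head?_strip_false a x (by rw [ha]; exact hax)
  · intro x hx
    have hx2 : (a ++ ' ' :: b).getLast? = b.getLast? := by
      rw [show a ++ ' ' :: b = (a ++ [' ']) ++ b by simp, List.getLast?_append]
      cases hb2 : b.getLast? with
      | none => exact absurd (List.getLast?_eq_none_iff.mp hb2) hb'
      | some y => rfl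
    rw [hx2] at hx
    apply getLast?_strip_false b
    rw [hb]; exact hx

-- ---- string-level wrappers ----

def okS (s : String) : Prop := PySem.Str.strip s = s

lemma okS_strip (s : String) : okS (PySem.Str.strip s) := by
  unfold okS
  apply String.toList_inj.mp
  rw [PySem.Str.toList_strip, PySem.Str.toList_strip]
  exact strip_idem s.toList

lemma okS_empty : okS "" := by unfold okS; decide

lemma toList_ne_nil {s : String} (h : s ≠ "") : s.toList ≠ [] := by
  intro hc; exact h (String.toList_inj.mp (by simp [hc]))

lemma join_ne_empty (a b : String) : a ++ " " ++ b ≠ "" := by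
  intro hc
  have := congrArg String.toList hc
  simp at this

lemma okS_join (a b : String) (ha : okS a) (hb : okS b) (ha' : a ≠ "") (hb' : b ≠ "") :
    PySem.Str.strip (a ++ " " ++ b) = a ++ " " ++ b := by
  apply String.toList_inj.mp
  rw [PySem.Str.toList_strip]
  have hl : (a ++ " " ++ b).toList = a.toList ++ ' ' :: b.toList := by simp
  rw [hl]
  refine strip_join _ _ ?_ ?_ (toList_ne_nil ha') (toList_ne_nil hb')
  · have := congrArg String.toList ha; rwa [PySem.Str.toList_strip] at this
  · have := congrArg String.toList hb; rwa [PySem.Str.toList_strip] at this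

-- ---- common specification F: A's state machine on the stripped lines ----

def F (mc : Int) : Int → String → Int → List String → List (String × Int × Int)
  | i, buf, bst, [] => if buf ≠ "" then [(buf, bst, i - 1)] else []
  | i, buf, bst, s :: rest =>
    if s = "" then
      if buf ≠ "" then (buf, bst, i - 1) :: F mc (i + 1) "" 0 rest
      else F mc (i + 1) "" 0 rest
    else
      let b := if buf = "" then i else bst
      if PySem.Str.len buf + PySem.Str.len s + 1 > mc then
        (buf, b, i - 1) :: F mc (i + 1) s i rest
      else
        F mc (i + 1) (if buf = "" then s else buf ++ " " ++ s) b rest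

def finalizeA (r : List (String × Int × Int) × String × Option Int) (n : Int) :
    List (String × Int × Int) :=
  if r.2.1 ≠ "" then r.1 ++ [(r.2.1, r.2.2.getD 0, n)] else r.1

-- ---- A-side: the fold over strips equals the fold over pre-stripped lines ----

lemma aStep_strip (mc : Int) (acc : List (String × Int × Int) × String × Option Int)
    (i : Int) (l : String) : aStep mc acc (i, PySem.Str.strip l) = aStep mc acc (i, l) := by
  simp only [aStep]
  rw [show PySem.Str.strip (PySem.Str.strip l) = PySem.Str.strip l from okS_strip l]

lemma foldl_aStep_strip (mc : Int) (lines : List String) :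
    ∀ (i : Int) (acc : List (String × Int × Int) × String × Option Int),
      (PySem.List.enumerate lines i).foldl (aStep mc) acc
      = (PySem.List.enumerate (lines.map PySem.Str.strip) i).foldl (aStep mc) acc := by
  induction lines with
  | nil => intro i acc; rfl
  | cons l t ih =>
    intro i acc
    rw [List.map_cons]
    rw [show PySem.List.enumerate (l :: t) i = (i, l) :: PySem.List.enumerate t (i + 1) by
      simp [PySem.List.enumerate]]
    rw [show PySem.List.enumerate (PySem.Str.strip l :: t.map PySem.Str.strip) i
        = (i, PySem.Str.strip l) :: PySem.List.enumerate (t.map PySem.Str.strip) (i + 1) by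
      simp [PySem.List.enumerate]]
    rw [List.foldl_cons, List.foldl_cons, aStep_strip]
    exact ih (i + 1) _

-- ---- A-side main induction: running A's fold from an encoded state is F ----

lemma A_eq_F (mc : Int) :
    ∀ (ws : List String), (∀ s ∈ ws, okS s) →
      ∀ (i : Int) (out : List (String × Int × Int)) (buf : String) (bst : Int), okS buf →
        ∀ (N : Int), N = i + (ws.length : Int) - 1 →
        finalizeA ((PySem.List.enumerate ws i).foldl (aStep mc)
            (out, buf, if buf = "" then none else some bst)) N
        = out ++ F mc i buf bst ws := by
  intro ws
  induction ws with
  | nil =>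
    intro _ i out buf bst _ N hN
    rw [show PySem.List.enumerate ([] : List String) i = [] by simp [PySem.List.enumerate]]
    rw [List.foldl_nil, F, finalizeA]
    by_cases hb : buf = ""
    · simp [hb]
    · simp only [hb, ne_eq, not_false_iff, if_pos, if_true]
      simp at hN
      simp [hb, hN]
  | cons s t ih =>
    intro hok i out buf bst hbufok N hN
    have hs : okS s := hok s (by simp)
    have hts : ∀ x ∈ t, okS x := fun x hx => hok x (by simp [hx])
    have hN' : N = (i + 1) + (t.length : Int) - 1 := by
      rw [hN]; push_cast [List.length_cons]; ring
    rw [show PySem.List.enumerate (s :: t) i = (i, s) :: PySem.List.enumerate t (i + 1) by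
      simp [PySem.List.enumerate]]
    rw [List.foldl_cons]
    by_cases hse : s = ""
    · subst hse
      by_cases hb : buf = ""
      · rw [show aStep mc (out, buf, if buf = "" then none else some bst) (i, "")
            = (out, "", if ("" : String) = "" then none else some 0) by
          simp [aStep, hb, show PySem.Str.strip "" = "" from okS_empty]]
        rw [ih hts (i + 1) out "" 0 okS_empty N hN']
        rw [F]
        simp [hb]
      · rw [show aStep mc (out, buf, if buf = "" then none else some bst) (i, "")
            = (out ++ [(buf, bst, i - 1)], "", if ("" : String) = "" then none else some 0) by
          simp [aStep, hb, show PySem.Str.strip "" = "" from okS_empty]]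
        rw [ih hts (i + 1) (out ++ [(buf, bst, i - 1)]) "" 0 okS_empty N hN']
        rw [F]
        simp [hb]
    · have hstep : aStep mc (out, buf, if buf = "" then none else some bst) (i, s)
          = if PySem.Str.len buf + PySem.Str.len s + 1 > mc then
              (out ++ [(buf, (if buf = "" then i else bst), i - 1)], s, some i)
            else
              (out, (if buf = "" then s else buf ++ " " ++ s),
                some (if buf = "" then i else bst)) := by
        simp only [aStep]
        rw [show PySem.Str.strip s = s from hs]
        rw [if_neg hse]
        by_cases hb : buf = ""
        · simp [hb]
        · simp [hb, okS_join buf s hbufok hs hb hse]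
      rw [hstep, F]
      rw [if_neg hse]
      split
      · rw [show (some i : Option Int) = if s = "" then none else some i from (if_neg hse).symm]
        rw [ih hts (i + 1) (out ++ [(buf, (if buf = "" then i else bst), i - 1)]) s i hs N hN']
        simp
      · by_cases hb : buf = ""
        · simp only [hb, ite_true]
          rw [show (some i : Option Int) = if s = "" then none else some i from (if_neg hse).symm]
          rw [ih hts (i + 1) out s i hs N hN']
        · simp only [if_neg hb]
          rw [show (some bst : Option Int) = if buf ++ " " ++ s = "" then none else some bst from
            (if_neg (join_ne_empty buf s)).symm]
          rw [ih hts (i + 1) out (buf ++ " " ++ s) bst (okS_join buf s hbufok hs hb hse) N hN']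

-- ---- B-side structural descriptions ----

def parasL (k : Int) : List String → List (Int × List String)
  | [] => []
  | s :: rest =>
    if s = "" then parasL (k + 1) rest
    else (k, s :: rest.takeWhile (· ≠ "")) ::
      parasL (k + 1 + (rest.takeWhile (· ≠ "")).length) (rest.dropWhile (· ≠ ""))
termination_by l => l.length
decreasing_by
  · simp
  · have := List.length_dropWhile_le (p := fun x : String => !decide (x = "")) (l := rest)
    simp at this ⊢; omega

-- proof-side structural description of B's phase-1 fold state
def specP : Option (Int × List String) → Int → List String → List (Int × List String)
  | none, _, [] => []
  | some c, _, [] => [c]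
  | none, i, s :: r => if s = "" then specP none (i + 1) r else specP (some (i, [s])) (i + 1) r
  | some c, i, s :: r =>
    if s = "" then c :: specP none (i + 1) r
    else specP (some (c.1, c.2 ++ [s])) (i + 1) r

def packEmit (mc : Int) : Int → String → Int → List String → List (String × Int × Int)
  | i, buf, bst, [] => [(buf, bst, i - 1)]
  | i, buf, bst, s :: rest =>
    if PySem.Str.len buf + PySem.Str.len s + 1 > mc then
      (buf, bst, i - 1) :: packEmit mc (i + 1) s i rest
    else
      packEmit mc (i + 1) (if buf = "" then s else buf ++ " " ++ s) bst rest

lemma packFold (mc start : Int) :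
    ∀ (ss : List String) (e : Int) (out : List (String × Int × Int)) (buf : String) (bst : Int),
      ((PySem.List.enumerate ss e).foldl (bPackStep mc start) (out, buf, bst)).1
        ++ [(((PySem.List.enumerate ss e).foldl (bPackStep mc start) (out, buf, bst)).2.1,
             ((PySem.List.enumerate ss e).foldl (bPackStep mc start) (out, buf, bst)).2.2,
             start + e + (ss.length : Int) - 1)]
      = out ++ packEmit mc (start + e) buf bst ss := by
  intro ss
  induction ss with
  | nil =>
    intro e out buf bst
    simp [PySem.List.enumerate, packEmit]
  | cons s rest ih =>
    intro e out buf bst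
    rw [show PySem.List.enumerate (s :: rest) e = (e, s) :: PySem.List.enumerate rest (e + 1) by
      simp [PySem.List.enumerate]]
    rw [List.foldl_cons, packEmit]
    have harith : start + e + ((s :: rest).length : Int) - 1
        = start + (e + 1) + (rest.length : Int) - 1 := by
      push_cast [List.length_cons]; ring
    rw [harith]
    simp only [bPackStep]
    split
    · rw [ih (e + 1) (out ++ [(buf, bst, start + e - 1)]) s (start + e)]
      rw [show start + (e + 1) = start + e + 1 by ring]
      simp
    · rw [ih (e + 1) out (if buf ≠ "" then buf ++ " " ++ s else s) bst]
      have hj : (if buf ≠ "" then buf ++ " " ++ s else s)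
          = (if buf = "" then s else buf ++ " " ++ s) := by
        by_cases hb : buf = ""
        · simp [hb]
        · simp [hb]
      rw [hj, show start + (e + 1) = start + e + 1 by ring]

lemma bPackInto_eq (mc : Int) (out : List (String × Int × Int)) (start : Int) (ss : List String) :
    bPackInto mc out (start, ss) = out ++ packEmit mc start "" start ss := by
  have h := packFold mc start ss 0 out "" start
  rw [show start + 0 = start by ring] at h
  unfold bPackInto
  rw [← h]
  simp [PySem.List.len_eq]

-- ---- F decomposes into paragraphs ----

lemma F_run (mc : Int) :
    ∀ (run : List String), (∀ s ∈ run, s ≠ "" ∧ okS s) →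
      ∀ (rest : List String), (rest = [] ∨ ∃ r', rest = "" :: r') →
        ∀ (k : Int) (buf : String) (bst : Int), buf ≠ "" → okS buf →
          F mc k buf bst (run ++ rest)
          = packEmit mc k buf bst run ++ F mc (k + run.length) "" 0 rest := by
  intro run
  induction run with
  | nil =>
    intro _ rest hrest k buf bst hbuf _
    rcases hrest with h0 | ⟨r', h0⟩ <;> subst h0
    · simp [F, packEmit, hbuf]
    · rw [List.nil_append, packEmit]
      rw [show F mc k buf bst ("" :: r') = (buf, bst, k - 1) :: F mc (k + 1) "" 0 r' by
        rw [F]; simp [hbuf]]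
      rw [show F mc (k + (List.length ([] : List String) : Int)) "" 0 ("" :: r')
          = F mc (k + 1) "" 0 r' by
        simp only [List.length_nil, Int.natCast_zero, add_zero]
        rw [F]; simp]
      simp
  | cons s r ih =>
    intro hrun rest hrest k buf bst hbuf hok
    have hs : s ≠ "" ∧ okS s := hrun s (by simp)
    have hr : ∀ x ∈ r, x ≠ "" ∧ okS x := fun x hx => hrun x (by simp [hx])
    rw [List.cons_append, F, packEmit]
    simp only [if_neg hs.1, if_neg hbuf]
    rw [show (k + ((s :: r).length : Int)) = (k + 1) + (r.length : Int) by
      push_cast [List.length_cons]; ring]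
    split
    · rw [ih hr rest hrest (k + 1) s k hs.1 hs.2]
      simp
    · rw [ih hr rest hrest (k + 1) (buf ++ " " ++ s) bst (join_ne_empty buf s)
        (okS_join buf s hok hs.2 hbuf hs.1)]

lemma dropWhile_head_shape (l : List String) :
    l.dropWhile (· ≠ "") = [] ∨ ∃ r', l.dropWhile (· ≠ "") = "" :: r' := by
  induction l with
  | nil => left; rfl
  | cons a t ih =>
    rw [List.dropWhile_cons]
    by_cases h : a = ""
    · right; exact ⟨t, by simp [h]⟩
    · simpa [h] using ih

lemma F_paras (mc : Int) :
    ∀ (ws : List String), (∀ s ∈ ws, okS s) → ∀ (k : Int),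
      F mc k "" 0 ws = (parasL k ws).flatMap (fun p => packEmit mc p.1 "" p.1 p.2) := by
  intro ws
  induction hlen : ws.length using Nat.strong_induction_on generalizing ws with
  | _ n ihn =>
  match ws with
  | [] => intro _ k; simp [F, parasL]
  | s :: rest =>
    intro hok k
    have hokr : ∀ x ∈ rest, okS x := fun x hx => hok x (by simp [hx])
    by_cases hse : s = ""
    · subst hse
      rw [show F mc k "" 0 ("" :: rest) = F mc (k + 1) "" 0 rest by rw [F]; simp]
      rw [parasL, if_pos rfl]
      exact ihn rest.length (by simp at hlen; omega) rest rfl hokr (k + 1)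
    · set tw := rest.takeWhile (· ≠ "") with htw
      set dw := rest.dropWhile (· ≠ "") with hdw
      have hsplit : rest = tw ++ dw := (List.takeWhile_append_dropWhile).symm
      have htwh : ∀ x ∈ tw, x ≠ "" ∧ okS x := by
        intro x hx
        refine ⟨by simpa using List.mem_takeWhile_imp hx, ?_⟩
        exact hokr x ((List.takeWhile_prefix _).sublist.mem hx)
      have hdwh : dw = [] ∨ ∃ r', dw = "" :: r' := dropWhile_head_shape rest
      have hdwok : ∀ x ∈ dw, okS x := fun x hx =>
        hokr x ((List.dropWhile_sublist _).mem hx)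
      have hdwlen : dw.length < n := by
        have := List.length_dropWhile_le (p := fun x : String => !decide (x = "")) (l := rest)
        simp at hlen
        simp [hdw] at this ⊢
        omega
      have hrec := ihn dw.length hdwlen dw rfl hdwok ((k + 1) + (tw.length : Int))
      have hFrun := F_run mc tw htwh dw hdwh (k + 1) s k hse
        (hok s (by simp))
      rw [parasL]
      rw [if_neg hse]
      simp only [List.flatMap_cons]
      rw [show F mc k "" 0 (s :: rest)
          = if PySem.Str.len "" + PySem.Str.len s + 1 > mc
            then ("", k, k - 1) :: F mc (k + 1) s k rest
            else F mc (k + 1) s k rest by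
        rw [F]; simp [hse]]
      rw [show packEmit mc k "" k (s :: tw)
          = if PySem.Str.len "" + PySem.Str.len s + 1 > mc
            then ("", k, k - 1) :: packEmit mc (k + 1) s k tw
            else packEmit mc (k + 1) s k tw by
        rw [packEmit]; simp [hse]]
      have hkey : F mc (k + 1) s k rest
          = packEmit mc (k + 1) s k tw
            ++ (parasL ((k + 1) + (tw.length : Int)) dw).flatMap
              (fun p => packEmit mc p.1 "" p.1 p.2) := by
        conv_lhs => rw [hsplit]
        rw [hFrun, hrec]
      rw [hkey]
      rw [← htw, ← hdw]
      split
      · simp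
      · simp

lemma foldl_bPackInto (mc : Int) :
    ∀ (ps : List (Int × List String)) (acc : List (String × Int × Int)),
      ps.foldl (bPackInto mc) acc
      = acc ++ ps.flatMap (fun p => packEmit mc p.1 "" p.1 p.2) := by
  intro ps
  induction ps with
  | nil => intro acc; simp
  | cons p t ih =>
    intro acc
    obtain ⟨st, ss⟩ := p
    rw [List.foldl_cons, bPackInto_eq, ih]
    simp

lemma specP_parasL :
    ∀ (ws : List String) (k : Int),
      specP none k ws = parasL k ws ∧
      ∀ (st : Int) (acc : List String),
        specP (some (st, acc)) k ws
        = (st, acc ++ ws.takeWhile (· ≠ "")) ::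
            parasL (k + ((ws.takeWhile (· ≠ "")).length : Int)) (ws.dropWhile (· ≠ "")) := by
  intro ws
  induction ws with
  | nil =>
    intro k
    constructor
    · simp [specP, parasL]
    · intro st acc
      simp [specP, parasL]
  | cons s r ih =>
    intro k
    constructor
    · by_cases hse : s = ""
      · subst hse
        rw [specP, parasL]
        simp only [if_pos rfl]
        exact (ih (k + 1)).1
      · rw [specP, parasL, if_neg hse, if_neg hse]
        rw [(ih (k + 1)).2 k [s]]
        simp
    · intro st acc
      by_cases hse : s = ""
      · subst hse
        rw [specP]
        simp only [if_pos rfl]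
        rw [(ih (k + 1)).1]
        have h1 : List.takeWhile (· ≠ "") ("" :: r) = ([] : List String) := by simp
        have h2 : List.dropWhile (· ≠ "") ("" :: r) = "" :: r := by simp
        rw [h1, h2]
        have hp : parasL (k + ((([] : List String).length : Nat) : Int)) ("" :: r)
            = parasL (k + 1) r := by
          rw [parasL]
          norm_num
        rw [hp]
        simp
      · rw [specP, if_neg hse]
        rw [(ih (k + 1)).2 st (acc ++ [s])]
        rw [List.takeWhile_cons, List.dropWhile_cons,
          if_pos (by simpa using hse), if_pos (by simpa using hse)]
        congr 1
        · simp
        · congr 1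
          push_cast [List.length_cons]
          ring

lemma foldl_bParaStep :
    ∀ (ws : List String) (i : Int) (paras : List (Int × List String))
      (cur : Option (Int × List String)),
      (match ((PySem.List.enumerate ws i).foldl bParaStep (paras, cur)).2 with
       | none => ((PySem.List.enumerate ws i).foldl bParaStep (paras, cur)).1
       | some c => ((PySem.List.enumerate ws i).foldl bParaStep (paras, cur)).1 ++ [c])
      = paras ++ specP cur i ws := by
  intro ws
  induction ws with
  | nil =>
    intro i paras cur
    rw [show PySem.List.enumerate ([] : List String) i = [] by simp [PySem.List.enumerate]]
    rw [List.foldl_nil]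
    cases cur with
    | none => rw [specP]; simp
    | some c => rw [specP]
  | cons s r ih =>
    intro i paras cur
    rw [show PySem.List.enumerate (s :: r) i = (i, s) :: PySem.List.enumerate r (i + 1) by
      simp [PySem.List.enumerate]]
    rw [List.foldl_cons]
    by_cases hse : s = ""
    · subst hse
      cases cur with
      | none =>
        rw [show bParaStep (paras, none) (i, "") = (paras, none) by rw [bParaStep]; simp]
        rw [ih (i + 1) paras none, specP]
        simp
      | some c =>
        rw [show bParaStep (paras, some c) (i, "") = (paras ++ [c], none) by
          rw [bParaStep]; simp]
        rw [ih (i + 1) (paras ++ [c]) none, specP]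
        simp
    · cases cur with
      | none =>
        rw [show bParaStep (paras, none) (i, s) = (paras, some (i, [s])) by
          rw [bParaStep]; simp [hse]]
        rw [ih (i + 1) paras (some (i, [s]))]
        rw [show specP none i (s :: r) = specP (some (i, [s])) (i + 1) r by
          rw [specP, if_neg hse]]
      | some c =>
        rw [show bParaStep (paras, some c) (i, s) = (paras, some (c.1, c.2 ++ [s])) by
          rw [bParaStep]; simp [hse]]
        rw [ih (i + 1) paras (some (c.1, c.2 ++ [s]))]
        rw [show specP (some c) i (s :: r) = specP (some (c.1, c.2 ++ [s])) (i + 1) r by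
          rw [show c = (c.1, c.2) from rfl, specP, if_neg hse]]

-- ===== VERDICT (by name: the statement is the Claim_ definition above) =====
theorem txt_blocks_with_lines_spec : Claim_equal_txt_blocks_with_lines := by
  intro raw mc _
  unfold Spec_txt_blocks_with_lines
  have hok : ∀ s ∈ (PySem.Str.splitlines raw).map PySem.Str.strip, okS s := by
    intro s hs
    simp only [List.mem_map] at hs
    obtain ⟨l, _, rfl⟩ := hs
    exact okS_strip l
  have hlen : PySem.List.len (PySem.Str.splitlines raw)
      = 1 + ((((PySem.Str.splitlines raw).map PySem.Str.strip).length : Nat) : Int) - 1 := by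
    simp [PySem.List.len_eq]
  have h2 := A_eq_F mc _ hok 1 [] "" 0 okS_empty _ hlen
  rw [if_pos rfl] at h2
  have h1 : txt_blocks_with_lines raw mc
      = finalizeA ((PySem.List.enumerate ((PySem.Str.splitlines raw).map PySem.Str.strip) 1).foldl
          (aStep mc) ([], "", none)) (PySem.List.len (PySem.Str.splitlines raw)) := by
    show finalizeA ((PySem.List.enumerate (PySem.Str.splitlines raw) 1).foldl
        (aStep mc) ([], "", none)) (PySem.List.len (PySem.Str.splitlines raw)) = _
    rw [foldl_aStep_strip]
  have hfold := foldl_bParaStep ((PySem.Str.splitlines raw).map PySem.Str.strip) 1 [] none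
  rw [(specP_parasL ((PySem.Str.splitlines raw).map PySem.Str.strip) 1).1, List.nil_append]
    at hfold
  have h5 : txt_blocks_with_lines_alt raw mc
      = (match ((PySem.List.enumerate ((PySem.Str.splitlines raw).map PySem.Str.strip) 1).foldl
            bParaStep ([], none)).2 with
         | none => ((PySem.List.enumerate ((PySem.Str.splitlines raw).map PySem.Str.strip) 1).foldl
            bParaStep ([], none)).1
         | some c => ((PySem.List.enumerate ((PySem.Str.splitlines raw).map PySem.Str.strip) 1).foldl
            bParaStep ([], none)).1 ++ [c]).foldl (bPackInto mc) [] := rfl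
  rw [h1, h2, List.nil_append, F_paras mc _ hok 1, h5, hfold, foldl_bPackInto]
  simp
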